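-- pv_equiv track=rewrite | github.com/ScottMastro/pangyplot | parser/parse_gaf.py | path_to_lists
-- ===== SOURCE A (Python) =====
-- def path_to_lists(path):
--     ids, strands = [], []
--     pos=0
--     for i,char in enumerate(path):
--         if char == ">" or char == "<":
--             strand = "+" if char == ">" else "-"
--             strands.append(strand)
--             if i != 0: ids.append(path[pos:i])
--             pos=i+1
--     ids.append(path[pos:])
--     return ids, strands
-- ===== SOURCE B (Python) =====
-- def path_to_lists(path):
--     strands = ['+' if c == '>' else '-' for c in path if c in '<>']
--     ids = path.replace('<', '>').split('>')
--     if len(ids) > 1 and ids[0] == '':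
--         ids = ids[1:]
--     return ids, strands
-- ===== Notes on version B (the rewrite author's own statement) =====
-- stated objective: idiomatic
-- what changed: B replaces A's index-tracking loop with manual slice bookkeeping by a declarative formulation: strands come from a filter-and-map comprehension over the delimiter characters, and ids come from normalising both delimiters to a single one with str.replace and splitting once with str.split, dropping the leading empty segment exactly when the path starts with a delimiter.
import Mathlib
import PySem

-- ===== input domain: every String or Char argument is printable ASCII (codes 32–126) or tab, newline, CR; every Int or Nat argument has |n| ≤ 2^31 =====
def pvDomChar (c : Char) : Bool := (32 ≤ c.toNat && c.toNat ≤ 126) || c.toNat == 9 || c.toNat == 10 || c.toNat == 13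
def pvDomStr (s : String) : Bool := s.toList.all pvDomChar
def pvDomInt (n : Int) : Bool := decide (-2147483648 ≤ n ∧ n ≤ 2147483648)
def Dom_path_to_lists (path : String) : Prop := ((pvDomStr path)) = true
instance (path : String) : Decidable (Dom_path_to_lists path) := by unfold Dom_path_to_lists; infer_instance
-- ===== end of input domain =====

-- B parses a GAF path declaratively (filter/map comprehension for strands, replace+split for ids)
-- instead of A's single loop with index/slice bookkeeping; same O(n) cost, return values proved equal.

-- ===== PORT A =====
-- A-side helper: the body of A's for-loop, named so the invariant lemma can refer to it
def stepA (path : String) (st : List String × List String × Int) (ic : Int × Char) :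
    List String × List String × Int :=
  if ic.2 = '>' ∨ ic.2 = '<' then
    let strand : String := if ic.2 = '>' then "+" else "-"
    (if ic.1 ≠ 0 then st.1 ++ [PySem.Str.slice path (some st.2.2) (some ic.1)] else st.1,
     st.2.1 ++ [strand], ic.1 + 1)
  else st

def path_to_lists (path : String) : List String × List String :=
  let st := (PySem.List.enumerate path.toList).foldl (stepA path) ([], [], 0)
  (st.1 ++ [PySem.Str.slice path (some st.2.2) none], st.2.1)

-- ===== PORT B =====
def path_to_lists_alt (path : String) : List String × List String :=
  let strands := (path.toList.filter
      (fun c => PySem.Str.isIn (String.ofList [c]) "<>")).map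
      (fun c => if c = '>' then ("+" : String) else "-")
  let parts := (PySem.Str.split? (PySem.Str.replace path "<" ">") ">").getD []
  let ids := if 1 < parts.length ∧ PySem.List.pyGet? parts 0 = some "" then
      PySem.List.slice parts (some 1) none
    else parts
  (ids, strands)

-- ===== PRECONDITION & SPEC =====
def Spec_path_to_lists (path : String) (out : List String × List String) : Prop := out = path_to_lists_alt path
instance (path : String) (out : List String × List String) : Decidable (Spec_path_to_lists path out) := by unfold Spec_path_to_lists; infer_instance

-- ===== CLAIM (what is proved, stated in full; the proofs are below) =====
def Claim_equal_path_to_lists : Prop := ∀ (path : String), Dom_path_to_lists path → Spec_path_to_lists path (path_to_lists path)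

-- ===== LEMMAS AND PROOFS =====

-- character helper used only by the proofs: what path.replace('<','>') does per character
def pvRepl (c : Char) : Char := if c = '<' then '>' else c

-- the split of a char list at '>'/'<' delimiters: (first segment, remaining segments)
def pvPieces : List Char → List Char × List (List Char)
  | [] => ([], [])
  | c :: t =>
    let r := pvPieces t
    if c = '>' ∨ c = '<' then ([], r.1 :: r.2) else (c :: r.1, r.2)

theorem pvRepl_eq_gt_iff (c : Char) : pvRepl c = '>' ↔ (c = '>' ∨ c = '<') := by
  unfold pvRepl
  by_cases h : c = '<' <;> simp [h]

-- replace.go with enough fuel maps pvRepl over the list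
theorem replace_go_repl (cs : List Char) : ∀ (fuel : Nat) (acc : List Char),
    cs.length ≤ fuel →
    PySem.Chars.replace.go ['<'] ['>'] fuel cs acc = acc.reverse ++ cs.map pvRepl := by
  induction cs with
  | nil =>
    intro fuel acc _
    cases fuel <;> simp [PySem.Chars.replace.go]
  | cons c t ih =>
    intro fuel acc hf
    cases fuel with
    | zero => simp at hf
    | succ f =>
      have ht : t.length ≤ f := by simpa using hf
      by_cases h : c = '<'
      · subst h
        simp [PySem.Chars.replace.go, ih f _ ht, pvRepl]
      · simp [PySem.Chars.replace.go, ih f _ ht, pvRepl, h]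
        exact fun hc => absurd hc.symm h

theorem replace_eq_map (cs : List Char) :
    PySem.Chars.replace cs ['<'] ['>'] = cs.map pvRepl := by
  unfold PySem.Chars.replace
  simpa using replace_go_repl cs cs.length [] (le_refl _)

-- splitOn.go at '>' over a pvRepl-mapped list computes pvPieces of the original list
theorem splitOn_go_pieces (cs : List Char) : ∀ (fuel : Nat) (cur : List Char) (acc : List (List Char)),
    cs.length < fuel →
    PySem.Chars.splitOn.go ['>'] fuel (cs.map pvRepl) cur acc
      = acc.reverse ++ ((cur.reverse ++ (pvPieces cs).1) :: (pvPieces cs).2) := by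
  induction cs with
  | nil =>
    intro fuel cur acc _
    cases fuel <;> simp [PySem.Chars.splitOn.go, pvPieces]
  | cons c t ih =>
    intro fuel cur acc hf
    cases fuel with
    | zero => omega
    | succ f =>
      have hf' : t.length < f := by simpa using Nat.lt_of_succ_lt_succ hf
      by_cases h : c = '>' ∨ c = '<'
      · have hr : pvRepl c = '>' := (pvRepl_eq_gt_iff c).2 h
        simp [PySem.Chars.splitOn.go, hr, pvPieces, h, ih f [] (cur.reverse :: acc) hf']
      · have hr : ¬ pvRepl c = '>' := fun hc => h ((pvRepl_eq_gt_iff c).1 hc)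
        have hc : pvRepl c = c := by
          unfold pvRepl; simp [show ¬ c = '<' from fun hc' => h (Or.inr hc')]
        simp [PySem.Chars.splitOn.go, pvPieces, h, hc, ih f (c :: cur) acc hf']
        exact fun hcc => absurd (Or.inl hcc.symm) h

theorem pieces_of_split (cs : List Char) :
    PySem.Chars.splitOn (cs.map pvRepl) ['>'] = (pvPieces cs).1 :: (pvPieces cs).2 := by
  unfold PySem.Chars.splitOn
  simpa using splitOn_go_pieces cs ((cs.map pvRepl).length + 1) [] [] (by simp)

-- string slice as ofList of drop/take
theorem strSlice_nat (path : String) (a b : Nat) :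
    PySem.Str.slice path (some (a : Int)) (some (b : Int))
      = String.ofList ((path.toList.drop a).take (b - a)) := by
  have h := congrArg String.ofList (PySem.Str.toList_slice path (some (a : Int)) (some (b : Int)))
  rw [String.ofList_toList] at h
  rw [h]
  congr 1
  simp [PySem.List.slice_natCast]

theorem strSlice_from_nat (path : String) (a : Nat) :
    PySem.Str.slice path (some (a : Int)) none = String.ofList (path.toList.drop a) := by
  have h := congrArg String.ofList (PySem.Str.toList_slice path (some (a : Int)) none)
  rw [String.ofList_toList] at h
  rw [h]
  congr 1
  simp [PySem.List.slice_from_natCast]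

-- the A-side loop invariant, for a loop started at index s ≥ 1 with slice start pos ≤ s
theorem loopA (path : String) : ∀ (suffix : List Char) (s pos : Nat)
    (ids strands : List String),
    path.toList.drop s = suffix → pos ≤ s → 1 ≤ s →
    ((((PySem.List.enumerate suffix (s : Int)).foldl (stepA path) (ids, strands, (pos : Int)))).1
        ++ [PySem.Str.slice path
            (some (((PySem.List.enumerate suffix (s : Int)).foldl (stepA path) (ids, strands, (pos : Int)))).2.2) none],
     (((PySem.List.enumerate suffix (s : Int)).foldl (stepA path) (ids, strands, (pos : Int)))).2.1)
    = (ids ++ (String.ofList ((path.toList.drop pos).take (s - pos) ++ (pvPieces suffix).1)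
          :: (pvPieces suffix).2.map String.ofList),
       strands ++ (suffix.filter (fun c => decide (c = '>' ∨ c = '<'))).map
          (fun c => if c = '>' then ("+" : String) else "-")) := by
  intro suffix
  induction suffix with
  | nil =>
    intro s pos ids strands hs hpos hs1
    have hlen : path.toList.length ≤ s := List.drop_eq_nil_iff.mp hs
    have htake : (path.toList.drop pos).take (s - pos) = path.toList.drop pos := by
      apply List.take_of_length_le
      rw [List.length_drop]
      omega
    simp [PySem.List.enumerate, strSlice_from_nat, pvPieces, htake]
  | cons c rest ih =>
    intro s pos ids strands hs hpos hs1
    have hdrop : path.toList.drop (s + 1) = rest := by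
      have h0 : path.toList.drop (s + 1) = (path.toList.drop s).drop 1 := by
        rw [List.drop_drop]
      rw [h0, hs]
      rfl
    have hs0 : ¬ ((s : Int) = 0) := by
      have : (1 : Int) ≤ (s : Int) := by exact_mod_cast hs1
      omega
    have hcast : ((s : Int)) + 1 = (((s + 1 : Nat)) : Int) := by push_cast; ring
    rw [PySem.List.enumerate_cons, List.foldl_cons]
    by_cases h : c = '>' ∨ c = '<'
    · have hstep : stepA path (ids, strands, (pos : Int)) ((s : Int), c)
          = (ids ++ [PySem.Str.slice path (some (pos : Int)) (some (s : Int))],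
             strands ++ [if c = '>' then ("+" : String) else "-"], (s : Int) + 1) := by
        simp [stepA, h]
        omega
      rw [hstep, hcast]
      rw [ih (s + 1) (s + 1)
          (ids ++ [PySem.Str.slice path (some (pos : Int)) (some (s : Int))])
          (strands ++ [if c = '>' then ("+" : String) else "-"]) hdrop (le_refl _) (by omega)]
      simp [pvPieces, h, strSlice_nat]
    · have hget : (path.toList.drop pos)[s - pos]? = some c := by
        rw [List.getElem?_drop]
        have h1 : pos + (s - pos) = s := by omega
        rw [h1]
        have h2 : (path.toList.drop s)[0]? = path.toList[s]? := by
          simp [List.getElem?_drop]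
        rw [← h2, hs]
        rfl
      have htake : (path.toList.drop pos).take (s + 1 - pos)
          = (path.toList.drop pos).take (s - pos) ++ [c] := by
        have h1 : s + 1 - pos = (s - pos) + 1 := by omega
        rw [h1, List.take_add_one, hget]
        rfl
      have hstep : stepA path (ids, strands, (pos : Int)) ((s : Int), c)
          = (ids, strands, (pos : Int)) := by
        simp [stepA, h]
      rw [hstep, hcast]
      rw [ih (s + 1) pos ids strands hdrop (by omega) (by omega)]
      simp [pvPieces, h, htake]

-- B's parts list, computed
theorem parts_eq (path : String) :
    (PySem.Str.split? (PySem.Str.replace path "<" ">") ">").getD []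
      = String.ofList (pvPieces path.toList).1 :: (pvPieces path.toList).2.map String.ofList := by
  unfold PySem.Str.split? PySem.Chars.split?
  have hrep : (PySem.Str.replace path "<" ">").toList = path.toList.map pvRepl := by
    rw [PySem.Str.toList_replace]
    exact replace_eq_map path.toList
  simp [hrep, pieces_of_split]

theorem isIn_delim (c : Char) :
    PySem.Str.isIn (String.ofList [c]) "<>" = decide (c = '>' ∨ c = '<') := by
  by_cases h1 : c = '>'
  · subst h1; decide
  · by_cases h2 : c = '<'
    · subst h2; decide
    · have h3 : PySem.Chars.isIn [c] ['<', '>'] = false := by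
        rw [PySem.Chars.isIn_eq_false_iff]
        intro hinf
        have hmem : c ∈ ['<', '>'] := hinf.sublist.subset (by simp)
        simp at hmem
        tauto
      unfold PySem.Str.isIn
      have h4 : (String.ofList [c]).toList = [c] := String.toList_ofList
      have h5 : ("<>" : String).toList = ['<', '>'] := rfl
      rw [h4, h5, h3]
      simp [h1, h2]

theorem path_to_lists_spec' (path : String) :
    path_to_lists path = path_to_lists_alt path := by
  unfold path_to_lists path_to_lists_alt
  rw [parts_eq]
  have hfilter : path.toList.filter (fun c => PySem.Str.isIn (String.ofList [c]) "<>")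
      = path.toList.filter (fun c => decide (c = '>' ∨ c = '<')) := by
    apply List.filter_congr
    intro c _
    exact isIn_delim c
  rw [hfilter]
  simp only []
  cases hcs : path.toList with
  | nil =>
    have hpath : path = "" := by
      have := congrArg String.ofList hcs
      rwa [String.ofList_toList] at this
    subst hpath
    simp at hcs
    decide
  | cons c rest =>
    have hdrop1 : path.toList.drop 1 = rest := by rw [hcs]; rfl
    have henum : PySem.List.enumerate (c :: rest) 0
        = ((0 : Int), c) :: PySem.List.enumerate rest (((1 : Nat)) : Int) := by
      rw [PySem.List.enumerate_cons]
      norm_num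
    rw [henum, List.foldl_cons]
    by_cases h : c = '>' ∨ c = '<'
    · have hd : decide (c = '>' ∨ c = '<') = true := by simp [h]
      have hstep : stepA path ([], [], 0) ((0 : Int), c)
          = ([], [if c = '>' then ("+" : String) else "-"], (((1 : Nat)) : Int)) := by
        simp [stepA, h]
      rw [hstep]
      rw [loopA path rest 1 1 [] [if c = '>' then ("+" : String) else "-"] hdrop1 (le_refl _) (le_refl _)]
      have hp : pvPieces (c :: rest) = ([], (pvPieces rest).1 :: (pvPieces rest).2) := by
        simp [pvPieces, h]
      have hcond : (1 < ((String.ofList (pvPieces (c :: rest)).1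
              :: (pvPieces (c :: rest)).2.map String.ofList).length) ∧
          PySem.List.pyGet? (String.ofList (pvPieces (c :: rest)).1
              :: (pvPieces (c :: rest)).2.map String.ofList) 0 = some "") := by
        rw [hp]
        constructor
        · simp
        · simp [PySem.List.pyGet?, PySem.List.pyIdx?]
          rfl
      rw [if_pos hcond, hp]
      simp [PySem.List.slice_from_one, hdrop1, List.filter_cons]
      rw [if_pos h]
      simp
    · have hd : decide (c = '>' ∨ c = '<') = false := by simp [h]
      have hstep : stepA path ([], [], 0) ((0 : Int), c) = ([], [], (((0 : Nat)) : Int)) := by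
        simp [stepA, h]
      rw [hstep]
      rw [loopA path rest 1 0 [] [] hdrop1 (by omega) (le_refl _)]
      have hp : pvPieces (c :: rest) = (c :: (pvPieces rest).1, (pvPieces rest).2) := by
        simp [pvPieces, h]
      have hcond : ¬ (1 < ((String.ofList (pvPieces (c :: rest)).1
              :: (pvPieces (c :: rest)).2.map String.ofList).length) ∧
          PySem.List.pyGet? (String.ofList (pvPieces (c :: rest)).1
              :: (pvPieces (c :: rest)).2.map String.ofList) 0 = some "") := by
        intro hcc
        have h6 := hcc.2
        simp [PySem.List.pyGet?, PySem.List.pyIdx?] at h6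
        rw [hp] at h6
        simp at h6
      rw [if_neg hcond, hp]
      simp [List.filter_cons, hcs]
      rw [if_neg h]

-- ===== VERDICT (by name: the statement is the Claim_ definition above) =====
theorem path_to_lists_spec : Claim_equal_path_to_lists := by
  intro path _
  unfold Spec_path_to_lists
  exact path_to_lists_spec' path
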